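-- pv_equiv track=rewrite | github.com/goncalog01/advent-of-code | 2023/14/part2.py | tilt_platform
-- ===== SOURCE A (Python) =====
-- def tilt_platform(map, round_rocks, cube_rocks, dir):
--     if dir == "north":
--         for i in range(len(map)):
--             for j, rock in enumerate(round_rocks):
--                 x = rock[0]
--                 y = rock[1]
--                 if y == i:
--                     while y != 0:
--                         if (x, y - 1) in round_rocks or (x, y - 1) in cube_rocks:
--                             break
--                         y -= 1
--                     round_rocks[j] = (x, y)
--     elif dir == "west":
--         for i in range(len(map[0])):
--             for j, rock in enumerate(round_rocks):
--                 x = rock[0]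
--                 y = rock[1]
--                 if x == i:
--                     while x != 0:
--                         if (x - 1, y) in round_rocks or (x - 1, y) in cube_rocks:
--                             break
--                         x -= 1
--                     round_rocks[j] = (x, y)
--     elif dir == "south":
--         for i in range(len(map) - 1, -1, -1):
--             for j, rock in enumerate(round_rocks):
--                 x = rock[0]
--                 y = rock[1]
--                 if y == i:
--                     while y != len(map) - 1:
--                         if (x, y + 1) in round_rocks or (x, y + 1) in cube_rocks:
--                             break
--                         y += 1
--                     round_rocks[j] = (x, y)
--     elif dir == "east":
--         for i in range(len(map[0]) - 1, -1, -1):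
--             for j, rock in enumerate(round_rocks):
--                 x = rock[0]
--                 y = rock[1]
--                 if x == i:
--                     while x != len(map[0]) - 1:
--                         if (x + 1, y) in round_rocks or (x + 1, y) in cube_rocks:
--                             break
--                         x += 1
--                     round_rocks[j] = (x, y)
--     return round_rocks
-- ===== SOURCE B (Python) =====
-- # B: instead of sweeping the grid line by line and re-scanning every rock with a
-- # while-slide (A), normalise the direction to "slide towards coordinate 0", sort the
-- # in-range rocks once by slide coordinate, and pack each rock in one step against the
-- # wall / nearest blocker, keeping per-line lists of cube keys and settled keys.
-- # Mutates round_rocks in place (same observable side effect as A) and returns it.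
-- def tilt_platform(map, round_rocks, cube_rocks, dir):
--     if dir == "north":
--         n = len(map); swap = False; rev = False
--     elif dir == "south":
--         n = len(map); swap = False; rev = True
--     elif dir == "west":
--         n = len(map[0]); swap = True; rev = False
--     elif dir == "east":
--         n = len(map[0]); swap = True; rev = True
--     else:
--         return round_rocks
--
--     def key(p):
--         v = p[0] if swap else p[1]
--         return n - 1 - v if rev else v
--
--     def col(p):
--         return p[1] if swap else p[0]
--
--     def mk(c, k):
--         v = n - 1 - k if rev else k
--         return (v, c) if swap else (c, v)
--
--     cube_cols = {}
--     for q in cube_rocks: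
--         cube_cols.setdefault(col(q), []).append(key(q))
--
--     order = sorted((key(p), j) for j, p in enumerate(round_rocks) if 0 <= key(p) < n)
--
--     settled = {}
--     for k, j in order:
--         c = col(round_rocks[j])
--         m = -1
--         for t in settled.get(c, []):
--             if m < t < k:
--                 m = t
--         for t in cube_cols.get(c, []):
--             if 0 <= t < k and m < t:
--                 m = t
--         settled.setdefault(c, []).append(m + 1)
--         round_rocks[j] = mk(c, m + 1)
--     return round_rocks
-- ===== Notes on version B (the rewrite author's own statement) =====
-- stated objective: alternative
-- what changed: A sweeps the grid line by line and, for every rock on the line, walks it cell by cell with linear list-membership tests; B normalises the direction, sorts the in-range rocks once by slide coordinate, and packs each rock in a single step against the wall or nearest blocker using per-line lists of cube and settled coordinates.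
import Mathlib
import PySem

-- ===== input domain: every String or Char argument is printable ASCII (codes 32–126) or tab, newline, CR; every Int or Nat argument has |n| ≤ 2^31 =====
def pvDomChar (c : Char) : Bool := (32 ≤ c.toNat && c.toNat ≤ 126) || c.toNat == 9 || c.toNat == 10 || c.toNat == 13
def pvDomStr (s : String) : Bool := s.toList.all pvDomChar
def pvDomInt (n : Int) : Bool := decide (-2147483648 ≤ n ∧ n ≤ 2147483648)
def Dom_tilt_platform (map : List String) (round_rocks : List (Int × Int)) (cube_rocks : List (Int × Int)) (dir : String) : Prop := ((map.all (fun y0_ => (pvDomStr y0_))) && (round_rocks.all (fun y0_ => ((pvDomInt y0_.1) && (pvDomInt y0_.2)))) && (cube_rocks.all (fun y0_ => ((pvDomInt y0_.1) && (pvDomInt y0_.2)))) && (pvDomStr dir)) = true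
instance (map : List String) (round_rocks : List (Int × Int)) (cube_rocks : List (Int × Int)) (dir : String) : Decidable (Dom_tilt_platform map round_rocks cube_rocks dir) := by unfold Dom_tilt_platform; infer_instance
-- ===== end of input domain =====

-- B replaces A's repeated line-by-line grid sweep (with a per-cell while-slide and linear
-- list membership) by: normalise the direction, sort the in-range rocks once by slide
-- coordinate, and pack each rock in one step against the wall / nearest blocker using
-- per-line lists of cube and settled coordinates.  Both Pythons mutate round_rocks in
-- place identically; the equivalence proved here is about the return value.

-- ===== PORT A =====
-- Python's `while y != 0` / `while y != len-1`: at every call site y lies on the wall side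
-- of the stop value, so the `≤` guards below are exactly Python's `!=` test (they are
-- also what makes the recursion terminate).
def slideNorth (L cubes : List (Int × Int)) (x y : Int) : Int :=
  if _h : y ≤ 0 then y
  else if (x, y - 1) ∈ L ∨ (x, y - 1) ∈ cubes then y
  else slideNorth L cubes x (y - 1)
termination_by y.toNat
decreasing_by omega

def slideWest (L cubes : List (Int × Int)) (x y : Int) : Int :=
  if _h : x ≤ 0 then x
  else if (x - 1, y) ∈ L ∨ (x - 1, y) ∈ cubes then x
  else slideWest L cubes (x - 1) y
termination_by x.toNat
decreasing_by omega

def slideSouth (R : Int) (L cubes : List (Int × Int)) (x y : Int) : Int :=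
  if _h : R - 1 ≤ y then y
  else if (x, y + 1) ∈ L ∨ (x, y + 1) ∈ cubes then y
  else slideSouth R L cubes x (y + 1)
termination_by (R - 1 - y).toNat
decreasing_by omega

def slideEast (C : Int) (L cubes : List (Int × Int)) (x y : Int) : Int :=
  if _h : C - 1 ≤ x then x
  else if (x + 1, y) ∈ L ∨ (x + 1, y) ∈ cubes then x
  else slideEast C L cubes (x + 1) y
termination_by (C - 1 - x).toNat
decreasing_by omega

-- `for j, rock in enumerate(round_rocks)` iterates the live, in-place-mutated list whose
-- length never changes: an index loop reading the current entry.
def tiltNorth (R : Int) (cubes rr : List (Int × Int)) : List (Int × Int) :=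
  (PySem.List.pyRange 0 R 1).foldl (fun L i =>
    (List.range L.length).foldl (fun L j =>
      let rock := L.getD j (0, 0)
      if rock.2 = i then L.set j (rock.1, slideNorth L cubes rock.1 rock.2) else L) L) rr

def tiltWest (C : Int) (cubes rr : List (Int × Int)) : List (Int × Int) :=
  (PySem.List.pyRange 0 C 1).foldl (fun L i =>
    (List.range L.length).foldl (fun L j =>
      let rock := L.getD j (0, 0)
      if rock.1 = i then L.set j (slideWest L cubes rock.1 rock.2, rock.2) else L) L) rr

def tiltSouth (R : Int) (cubes rr : List (Int × Int)) : List (Int × Int) :=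
  (PySem.List.pyRange (R - 1) (-1) (-1)).foldl (fun L i =>
    (List.range L.length).foldl (fun L j =>
      let rock := L.getD j (0, 0)
      if rock.2 = i then L.set j (rock.1, slideSouth R L cubes rock.1 rock.2) else L) L) rr

def tiltEast (C : Int) (cubes rr : List (Int × Int)) : List (Int × Int) :=
  (PySem.List.pyRange (C - 1) (-1) (-1)).foldl (fun L i =>
    (List.range L.length).foldl (fun L j =>
      let rock := L.getD j (0, 0)
      if rock.1 = i then L.set j (slideEast C L cubes rock.1 rock.2, rock.2) else L) L) rr

-- `map[0]` raises IndexError on an empty map (dir west/east); excluded by Pre_.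
def tilt_platform (map : List String) (round_rocks : List (Int × Int)) (cube_rocks : List (Int × Int)) (dir : String) : List (Int × Int) :=
  if dir = "north" then tiltNorth (PySem.List.len map) cube_rocks round_rocks
  else if dir = "west" then tiltWest (PySem.Str.len (map.getD 0 "")) cube_rocks round_rocks
  else if dir = "south" then tiltSouth (PySem.List.len map) cube_rocks round_rocks
  else if dir = "east" then tiltEast (PySem.Str.len (map.getD 0 "")) cube_rocks round_rocks
  else round_rocks

-- ===== PORT B =====
-- Source B's direction normalisation: key = slide coordinate (0 = the wall being slid to),
-- col = the fixed cross coordinate, pvMk rebuilds a raw position from (col, key).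
def pvKey (n : Int) (swap rev : Bool) (p : Int × Int) : Int :=
  let v := if swap then p.1 else p.2
  if rev then n - 1 - v else v

def pvCol (swap : Bool) (p : Int × Int) : Int :=
  if swap then p.2 else p.1

def pvMk (n : Int) (swap rev : Bool) (c k : Int) : Int × Int :=
  let v := if rev then n - 1 - k else k
  if swap then (v, c) else (c, v)

-- sort + one-shot packing (Source B's single generic code path)
def packTilt (n : Int) (swap rev : Bool) (cubes rr : List (Int × Int)) : List (Int × Int) :=
  let cubeCols : PySem.Dict Int (List Int) :=
    cubes.foldl (fun d q => d.modify (pvCol swap q) [] (· ++ [pvKey n swap rev q])) PySem.Dict.empty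
  let order : List (Int × Int) :=
    PySem.List.sorted2
      (((PySem.List.enumerate rr).filter
          (fun jp => decide (0 ≤ pvKey n swap rev jp.2 ∧ pvKey n swap rev jp.2 < n))).map
        (fun jp => (pvKey n swap rev jp.2, jp.1)))
      (·.1) (·.2) false
  (order.foldl (fun (st : PySem.Dict Int (List Int) × List (Int × Int)) kj =>
      let k := kj.1
      let j := kj.2
      let c := pvCol swap (st.2.getD j.toNat (0, 0))
      let m1 := (st.1.getD c []).foldl (fun m t => if m < t ∧ t < k then t else m) (-1)
      let m := (cubeCols.getD c []).foldl (fun m t => if 0 ≤ t ∧ t < k ∧ m < t then t else m) m1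
      (st.1.modify c [] (· ++ [m + 1]), st.2.set j.toNat (pvMk n swap rev c (m + 1))))
    (PySem.Dict.empty, rr)).2

def tilt_platform_alt (map : List String) (round_rocks : List (Int × Int)) (cube_rocks : List (Int × Int)) (dir : String) : List (Int × Int) :=
  if dir = "north" then packTilt (PySem.List.len map) false false cube_rocks round_rocks
  else if dir = "south" then packTilt (PySem.List.len map) false true cube_rocks round_rocks
  else if dir = "west" then packTilt (PySem.Str.len (map.getD 0 "")) true false cube_rocks round_rocks
  else if dir = "east" then packTilt (PySem.Str.len (map.getD 0 "")) true true cube_rocks round_rocks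
  else round_rocks

-- ===== PRECONDITION & SPEC =====
-- Pre_ excludes exactly the inputs where A raises: for dir "west"/"east" A evaluates
-- map[0], an IndexError on an empty map (B raises there too).
def Pre_tilt_platform (map : List String) (round_rocks : List (Int × Int)) (cube_rocks : List (Int × Int)) (dir : String) : Prop :=
  (dir = "west" ∨ dir = "east") → map ≠ []
instance (map : List String) (round_rocks : List (Int × Int)) (cube_rocks : List (Int × Int)) (dir : String) : Decidable (Pre_tilt_platform map round_rocks cube_rocks dir) := by unfold Pre_tilt_platform; infer_instance

def pvWitness_tilt_platform : List String × (List (Int × Int)) × (List (Int × Int)) × String :=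
  ([".#", "..", ".."], [(0, 2), (1, 2), (0, 1)], [(1, 0)], "north")

def Spec_tilt_platform (map : List String) (round_rocks : List (Int × Int)) (cube_rocks : List (Int × Int)) (dir : String) (out : List (Int × Int)) : Prop := out = tilt_platform_alt map round_rocks cube_rocks dir
instance (map : List String) (round_rocks : List (Int × Int)) (cube_rocks : List (Int × Int)) (dir : String) (out : List (Int × Int)) : Decidable (Spec_tilt_platform map round_rocks cube_rocks dir out) := by unfold Spec_tilt_platform; infer_instance

-- ===== CLAIM (what is proved, stated in full; the proofs are below) =====
def Claim_equal_tilt_platform : Prop := ∀ (map : List String) (round_rocks : List (Int × Int)) (cube_rocks : List (Int × Int)) (dir : String), Dom_tilt_platform map round_rocks cube_rocks dir → Pre_tilt_platform map round_rocks cube_rocks dir → Spec_tilt_platform map round_rocks cube_rocks dir (tilt_platform map round_rocks cube_rocks dir)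

-- ===== LEMMAS AND PROOFS =====

-- accessor facts for the direction normalisation
theorem key_mk (n : Int) (s r : Bool) (c k : Int) : pvKey n s r (pvMk n s r c k) = k := by
  cases s <;> cases r <;> simp [pvKey, pvMk]

theorem col_mk (n : Int) (s r : Bool) (c k : Int) : pvCol s (pvMk n s r c k) = c := by
  cases s <;> cases r <;> simp [pvCol, pvMk]

theorem mk_eta (n : Int) (s r : Bool) (p : Int × Int) :
    pvMk n s r (pvCol s p) (pvKey n s r p) = p := by
  cases s <;> cases r <;> simp [pvCol, pvKey, pvMk]

theorem eq_mk_iff (n : Int) (s r : Bool) (p : Int × Int) (c k : Int) :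
    p = pvMk n s r c k ↔ pvCol s p = c ∧ pvKey n s r p = k := by
  constructor
  · rintro rfl; exact ⟨col_mk .., key_mk ..⟩
  · rintro ⟨hc, hk⟩; rw [← hc, ← hk, mk_eta]

-- generic (direction-normalised) transcription of A's while-slide and double loop
def slideG (n : Int) (s r : Bool) (L cubes : List (Int × Int)) (c k : Int) : Int :=
  if _h : k ≤ 0 then k
  else if pvMk n s r c (k - 1) ∈ L ∨ pvMk n s r c (k - 1) ∈ cubes then k
  else slideG n s r L cubes c (k - 1)
termination_by k.toNat
decreasing_by omega

def simG (n : Int) (s r : Bool) (cubes rr : List (Int × Int)) : List (Int × Int) :=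
  (PySem.List.pyRange 0 n 1).foldl (fun L i =>
    (List.range L.length).foldl (fun L j =>
      let p := L.getD j (0, 0)
      if pvKey n s r p = i then
        L.set j (pvMk n s r (pvCol s p) (slideG n s r L cubes (pvCol s p) (pvKey n s r p)))
      else L) L) rr

-- ===== bridges: each literal branch of A equals the generic simulation =====
theorem slideNorth_eq (n : Int) (L cubes : List (Int × Int)) (x y : Int) :
    slideNorth L cubes x y = slideG n false false L cubes x y := by
  induction y using slideNorth.induct (L := L) (cubes := cubes) (x := x) with
  | case1 y h => rw [slideNorth.eq_def, slideG.eq_def]; simp [h]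
  | case2 y h hb => rw [slideNorth.eq_def, slideG.eq_def]; simp [pvMk, h, hb]
  | case3 y h hb ih => rw [slideNorth.eq_def, slideG.eq_def]; simp [pvMk, h, hb] at *; simpa using ih

theorem slideWest_eq (n : Int) (L cubes : List (Int × Int)) (x y : Int) :
    slideWest L cubes x y = slideG n true false L cubes y x := by
  induction x using slideWest.induct (L := L) (cubes := cubes) (y := y) with
  | case1 x h => rw [slideWest.eq_def, slideG.eq_def]; simp [h]
  | case2 x h hb => rw [slideWest.eq_def, slideG.eq_def]; simp [pvMk, h, hb]
  | case3 x h hb ih => rw [slideWest.eq_def, slideG.eq_def]; simp [pvMk, h, hb] at *; simpa using ih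

theorem slideSouth_eq (R : Int) (L cubes : List (Int × Int)) (x y : Int) :
    slideSouth R L cubes x y = R - 1 - slideG R false true L cubes x (R - 1 - y) := by
  induction y using slideSouth.induct (R := R) (L := L) (cubes := cubes) (x := x) with
  | case1 y h =>
    rw [slideSouth.eq_def, slideG.eq_def]
    have h0 : R - 1 - y ≤ 0 := by omega
    simp [h, h0]
  | case2 y h hb =>
    rw [slideSouth.eq_def, slideG.eq_def]
    have h0 : ¬ (R - 1 - y ≤ 0) := by omega
    have e : R - 1 - (R - 1 - y - 1) = y + 1 := by omega
    simp [pvMk, h, hb, h0, e]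
  | case3 y h hb ih =>
    rw [slideSouth.eq_def, slideG.eq_def]
    have h0 : ¬ (R - 1 - y ≤ 0) := by omega
    have e : R - 1 - (R - 1 - y - 1) = y + 1 := by omega
    have e2 : R - 1 - y - 1 = R - 1 - (y + 1) := by omega
    simp [pvMk, h, hb, h0, e2, ih]

theorem slideEast_eq (C : Int) (L cubes : List (Int × Int)) (x y : Int) :
    slideEast C L cubes x y = C - 1 - slideG C true true L cubes y (C - 1 - x) := by
  induction x using slideEast.induct (C := C) (L := L) (cubes := cubes) (y := y) with
  | case1 x h =>
    rw [slideEast.eq_def, slideG.eq_def]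
    have h0 : C - 1 - x ≤ 0 := by omega
    simp [h, h0]
  | case2 x h hb =>
    rw [slideEast.eq_def, slideG.eq_def]
    have h0 : ¬ (C - 1 - x ≤ 0) := by omega
    have e : C - 1 - (C - 1 - x - 1) = x + 1 := by omega
    simp [pvMk, h, hb, h0, e]
  | case3 x h hb ih =>
    rw [slideEast.eq_def, slideG.eq_def]
    have h0 : ¬ (C - 1 - x ≤ 0) := by omega
    have e : C - 1 - (C - 1 - x - 1) = x + 1 := by omega
    have e2 : C - 1 - x - 1 = C - 1 - (x + 1) := by omega
    simp [pvMk, h, hb, h0, e2, ih]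

theorem tiltNorth_eq (R : Int) (cubes rr : List (Int × Int)) :
    tiltNorth R cubes rr = simG R false false cubes rr := by
  unfold tiltNorth simG
  apply PySem.List.foldl_congr_mem; intro L i _
  apply PySem.List.foldl_congr_mem; intro L' j _
  simp [pvKey, pvCol, pvMk, ← slideNorth_eq R]

theorem tiltWest_eq (C : Int) (cubes rr : List (Int × Int)) :
    tiltWest C cubes rr = simG C true false cubes rr := by
  unfold tiltWest simG
  apply PySem.List.foldl_congr_mem; intro L i _
  apply PySem.List.foldl_congr_mem; intro L' j _
  simp [pvKey, pvCol, pvMk, ← slideWest_eq C]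

theorem tiltSouth_eq (R : Int) (cubes rr : List (Int × Int)) :
    tiltSouth R cubes rr = simG R false true cubes rr := by
  unfold tiltSouth simG
  rw [PySem.List.pyRange_neg_one, PySem.List.pyRange_one, List.foldl_map, List.foldl_map]
  have hlen : (R - 1 - -1).toNat = (R - 0).toNat := by omega
  rw [hlen]
  apply PySem.List.foldl_congr_mem; intro L kk _
  apply PySem.List.foldl_congr_mem; intro L' j _
  simp [pvKey, pvCol, pvMk, slideSouth_eq R]
  split_ifs <;> first | rfl | omega

theorem tiltEast_eq (C : Int) (cubes rr : List (Int × Int)) :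
    tiltEast C cubes rr = simG C true true cubes rr := by
  unfold tiltEast simG
  rw [PySem.List.pyRange_neg_one, PySem.List.pyRange_one, List.foldl_map, List.foldl_map]
  have hlen : (C - 1 - -1).toNat = (C - 0).toNat := by omega
  rw [hlen]
  apply PySem.List.foldl_congr_mem; intro L kk _
  apply PySem.List.foldl_congr_mem; intro L' j _
  simp [pvKey, pvCol, pvMk, slideEast_eq C]
  split_ifs <;> first | rfl | omega

-- ===== the main equivalence: generic simulation = sort-and-pack =====

-- shorthands over the working state
def keyAt (n : Int) (s r : Bool) (L : List (Int × Int)) (j : Nat) : Int := pvKey n s r (L.getD j (0, 0))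
def colAt (s : Bool) (L : List (Int × Int)) (j : Nat) : Int := pvCol s (L.getD j (0, 0))

def cubeColsOf (n : Int) (s r : Bool) (cubes : List (Int × Int)) : PySem.Dict Int (List Int) :=
  cubes.foldl (fun d q => d.modify (pvCol s q) [] (· ++ [pvKey n s r q])) PySem.Dict.empty

-- the two fold bodies, named so they can be reasoned about
def pstep (n : Int) (s r : Bool) (cubeCols : PySem.Dict Int (List Int))
    (st : PySem.Dict Int (List Int) × List (Int × Int)) (kj : Int × Int) :
    PySem.Dict Int (List Int) × List (Int × Int) :=
  let k := kj.1
  let j := kj.2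
  let c := pvCol s (st.2.getD j.toNat (0, 0))
  let m1 := (st.1.getD c []).foldl (fun m t => if m < t ∧ t < k then t else m) (-1)
  let m := (cubeCols.getD c []).foldl (fun m t => if 0 ≤ t ∧ t < k ∧ m < t then t else m) m1
  (st.1.modify c [] (· ++ [m + 1]), st.2.set j.toNat (pvMk n s r c (m + 1)))

def sstep (n : Int) (s r : Bool) (cubes : List (Int × Int)) (i : Int)
    (L : List (Int × Int)) (j : Nat) : List (Int × Int) :=
  let p := L.getD j (0, 0)
  if pvKey n s r p = i then
    L.set j (pvMk n s r (pvCol s p) (slideG n s r L cubes (pvCol s p) (pvKey n s r p)))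
  else L

theorem packTilt_def (n : Int) (s r : Bool) (cubes rr : List (Int × Int)) :
    packTilt n s r cubes rr =
      ((PySem.List.sorted2
          (((PySem.List.enumerate rr).filter
              (fun jp => decide (0 ≤ pvKey n s r jp.2 ∧ pvKey n s r jp.2 < n))).map
            (fun jp => (pvKey n s r jp.2, jp.1)))
          (·.1) (·.2) false).foldl (pstep n s r (cubeColsOf n s r cubes))
        (PySem.Dict.empty, rr)).2 := rfl

theorem simG_def (n : Int) (s r : Bool) (cubes rr : List (Int × Int)) :
    simG n s r cubes rr =
      (PySem.List.pyRange 0 n 1).foldl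
        (fun L i => (List.range L.length).foldl (sstep n s r cubes i) L) rr := rfl

-- processing order: row groups, ascending slide coordinate, original index order inside a row
def idxPair (i : Int) (j : Nat) : Int × Int := (i, (j : Int))

def rowJs (n : Int) (s r : Bool) (rr : List (Int × Int)) (i : Int) : List Nat :=
  (List.range rr.length).filter (fun j => decide (keyAt n s r rr j = i))

theorem sorted2_eq_sorted_lex (xs : List (Int × Int)) :
    PySem.List.sorted2 xs (·.1) (·.2) false
      = PySem.List.sorted xs (fun p => (toLex p : Lex (Int × Int))) false := by
  have hbef : (fun (a b : Int × Int) =>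
        (decide (a.1 < b.1) || (!decide (b.1 < a.1) && decide (a.2 < b.2))))
      = (fun (a b : Int × Int) => decide ((toLex a : Lex (Int × Int)) < toLex b)) := by
    funext a b
    rcases lt_trichotomy a.1 b.1 with h | h | h <;>
      simp [Prod.Lex.lt_iff, h, not_lt_of_gt]
  show xs.foldl (fun acc x => PySem.List.insertBy _ x acc) []
      = xs.foldl (fun acc x => PySem.List.insertBy _ x acc) []
  rw [hbef]

theorem sorted_groups (n : Int) (s r : Bool) (rr : List (Int × Int)) :
    PySem.List.sorted2
        (((PySem.List.enumerate rr).filter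
            (fun jp => decide (0 ≤ pvKey n s r jp.2 ∧ pvKey n s r jp.2 < n))).map
          (fun jp => (pvKey n s r jp.2, jp.1)))
        (·.1) (·.2) false
      = (PySem.List.pyRange 0 n 1).flatMap
          (fun i => (rowJs n s r rr i).map (idxPair i)) := by
  -- the item list, re-expressed as a map over filtered Nat indices
  have hitems :
      (((PySem.List.enumerate rr).filter
          (fun jp => decide (0 ≤ pvKey n s r jp.2 ∧ pvKey n s r jp.2 < n))).map
        (fun jp => (pvKey n s r jp.2, jp.1)))
      = ((List.range rr.length).filter
          (fun j => decide (0 ≤ keyAt n s r rr j ∧ keyAt n s r rr j < n))).map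
          (fun j => (keyAt n s r rr j, (j : Int))) := by
    rw [PySem.List.enumerate_eq_map_pyRange rr (0, 0), PySem.List.len_eq,
      PySem.List.pyRange_zero_nat, List.map_map, List.filter_map, List.map_map]
    simp only [Function.comp_def]
    simp [keyAt]
  rw [hitems, sorted2_eq_sorted_lex]
  -- the grouped target, re-expressed as one map over the flattened index groups
  have hgr : (PySem.List.pyRange 0 n 1).flatMap
        (fun i => (rowJs n s r rr i).map (idxPair i))
      = ((PySem.List.pyRange 0 n 1).flatMap (fun i => rowJs n s r rr i)).map
          (fun j => (keyAt n s r rr j, (j : Int))) := by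
    rw [List.map_flatMap, List.flatMap_def, List.flatMap_def]
    congr 1
    apply List.map_congr_left
    intro i _
    apply List.map_congr_left
    intro j hj
    simp only [rowJs, List.mem_filter, decide_eq_true_eq] at hj
    simp [idxPair, hj.2]
  have hndflat : ((PySem.List.pyRange 0 n 1).flatMap (fun i => rowJs n s r rr i)).Nodup := by
    rw [List.flatMap_def, List.nodup_flatten]
    constructor
    · intro l hl
      obtain ⟨i, _, rfl⟩ := List.mem_map.mp hl
      exact List.Nodup.filter _ (List.nodup_range)
    · refine List.Pairwise.map _ ?_ (PySem.List.pairwise_lt_pyRange_one 0 n)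
      intro i i' hlt j hj hj'
      simp only [rowJs, List.mem_filter, decide_eq_true_eq] at hj hj'
      omega
  have hperm : ((PySem.List.pyRange 0 n 1).flatMap (fun i => rowJs n s r rr i)).Perm
      ((List.range rr.length).filter
        (fun j => decide (0 ≤ keyAt n s r rr j ∧ keyAt n s r rr j < n))) := by
    rw [List.perm_ext_iff_of_nodup hndflat (List.Nodup.filter _ (List.nodup_range))]
    intro j
    simp only [List.mem_flatMap, rowJs, List.mem_filter, List.mem_range,
      PySem.List.mem_pyRange_one, decide_eq_true_eq]
    constructor
    · rintro ⟨i, ⟨h0, h1⟩, hj, hk⟩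
      exact ⟨hj, by omega, by omega⟩
    · rintro ⟨hj, h0, h1⟩
      exact ⟨keyAt n s r rr j, ⟨h0, h1⟩, hj, rfl⟩
  apply PySem.List.sorted_eq_of_perm_of_pairwise_lt
  · rw [hgr]
    exact List.Perm.map _ hperm
  · rw [List.flatMap_def, List.pairwise_flatten]
    constructor
    · intro l hl
      obtain ⟨i, _, rfl⟩ := List.mem_map.mp hl
      refine List.Pairwise.map _ ?_ (show (rowJs n s r rr i).Pairwise (· < ·) by
        unfold rowJs; exact List.Pairwise.filter _ List.pairwise_lt_range)
      intro a b hab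
      rw [Prod.Lex.lt_iff]
      right
      exact ⟨rfl, by simp [idxPair]; exact_mod_cast hab⟩
    · refine List.Pairwise.map _ ?_ (PySem.List.pairwise_lt_pyRange_one 0 n)
      intro i i' hlt x hx y hy
      obtain ⟨a, _, rfl⟩ := List.mem_map.mp hx
      obtain ⟨b, _, rfl⟩ := List.mem_map.mp hy
      rw [Prod.Lex.lt_iff]
      left
      exact hlt

-- which rocks have already been moved: everything on an earlier line, plus the rocks of
-- line i that the current inner sweep has already passed (those no longer in js)
def DoneP (n : Int) (s r : Bool) (rr : List (Int × Int)) (i : Int) (js : List Nat) (j : Nat) : Prop :=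
  (0 ≤ keyAt n s r rr j ∧ keyAt n s r rr j < i) ∨ (keyAt n s r rr j = i ∧ j ∉ js)

-- the coupling invariant between A's in-place list L and B's settled-keys dict S
def SimInv (n : Int) (s r : Bool) (rr L : List (Int × Int)) (S : PySem.Dict Int (List Int))
    (D : Nat → Prop) : Prop :=
  L.length = rr.length ∧
  (∀ j, j < rr.length → D j →
      colAt s L j = colAt s rr j ∧ 0 ≤ keyAt n s r L j ∧ keyAt n s r L j ≤ keyAt n s r rr j ∧
      keyAt n s r L j ∈ S.getD (colAt s L j) []) ∧
  (∀ j, j < rr.length → ¬ D j → L.getD j (0, 0) = rr.getD j (0, 0)) ∧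
  (∀ c t, t ∈ S.getD c [] → 0 ≤ t ∧ ∃ j, j < rr.length ∧ D j ∧ L.getD j (0, 0) = pvMk n s r c t)

theorem SimInv_congr (n : Int) (s r : Bool) (rr L : List (Int × Int))
    (S : PySem.Dict Int (List Int)) (D D' : Nat → Prop)
    (h : ∀ j, j < rr.length → (D j ↔ D' j)) :
    SimInv n s r rr L S D → SimInv n s r rr L S D' := by
  rintro ⟨h1, h2, h3, h4⟩
  refine ⟨h1, fun j hj hD => h2 j hj ((h j hj).mpr hD), fun j hj hD => h3 j hj (fun d => hD ((h j hj).mp d)), fun c t ht => ?_⟩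
  obtain ⟨h0, j, hj, hD, he⟩ := h4 c t ht
  exact ⟨h0, j, hj, (h j hj).mp hD, he⟩

-- the scan `for t in l: if m < t < k: m = t` computes the maximum candidate
theorem maxScan1 (k : Int) (l : List Int) :
    ∀ m0 : Int,
      m0 ≤ l.foldl (fun m t => if m < t ∧ t < k then t else m) m0 ∧
      (l.foldl (fun m t => if m < t ∧ t < k then t else m) m0 = m0 ∨
        (l.foldl (fun m t => if m < t ∧ t < k then t else m) m0 ∈ l ∧
         l.foldl (fun m t => if m < t ∧ t < k then t else m) m0 < k)) ∧
      (∀ t ∈ l, t < k → t ≤ l.foldl (fun m t => if m < t ∧ t < k then t else m) m0) := by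
  induction l with
  | nil => intro m0; simp
  | cons t l ih =>
    intro m0
    simp only [List.foldl_cons]
    by_cases h : m0 < t ∧ t < k
    · rw [if_pos h]
      obtain ⟨hle, hmem, hmax⟩ := ih t
      refine ⟨by omega, ?_, ?_⟩
      · rcases hmem with h1 | ⟨h1, h2⟩
        · exact Or.inr ⟨by simp [h1], by omega⟩
        · exact Or.inr ⟨by simp [h1], h2⟩
      · intro t' ht' hk'
        rcases List.mem_cons.mp ht' with rfl | ht'
        · exact hle
        · exact hmax t' ht' hk'
    · rw [if_neg h]
      obtain ⟨hle, hmem, hmax⟩ := ih m0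
      refine ⟨hle, ?_, ?_⟩
      · rcases hmem with h1 | ⟨h1, h2⟩
        · exact Or.inl h1
        · exact Or.inr ⟨by simp [h1], h2⟩
      · intro t' ht' hk'
        rcases List.mem_cons.mp ht' with rfl | ht'
        · omega
        · exact hmax t' ht' hk' 

theorem maxScan2 (k : Int) (l : List Int) :
    ∀ m0 : Int,
      m0 ≤ l.foldl (fun m t => if 0 ≤ t ∧ t < k ∧ m < t then t else m) m0 ∧
      (l.foldl (fun m t => if 0 ≤ t ∧ t < k ∧ m < t then t else m) m0 = m0 ∨
        (l.foldl (fun m t => if 0 ≤ t ∧ t < k ∧ m < t then t else m) m0 ∈ l ∧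
         0 ≤ l.foldl (fun m t => if 0 ≤ t ∧ t < k ∧ m < t then t else m) m0 ∧
         l.foldl (fun m t => if 0 ≤ t ∧ t < k ∧ m < t then t else m) m0 < k)) ∧
      (∀ t ∈ l, 0 ≤ t → t < k → t ≤ l.foldl (fun m t => if 0 ≤ t ∧ t < k ∧ m < t then t else m) m0) := by
  induction l with
  | nil => intro m0; simp
  | cons t l ih =>
    intro m0
    simp only [List.foldl_cons]
    by_cases h : 0 ≤ t ∧ t < k ∧ m0 < t
    · rw [if_pos h]
      obtain ⟨hle, hmem, hmax⟩ := ih t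
      refine ⟨by omega, ?_, ?_⟩
      · rcases hmem with h1 | ⟨h1, h2, h3⟩
        · exact Or.inr ⟨by simp [h1], by omega, by omega⟩
        · exact Or.inr ⟨by simp [h1], h2, h3⟩
      · intro t' ht' h0' hk'
        rcases List.mem_cons.mp ht' with rfl | ht'
        · exact hle
        · exact hmax t' ht' h0' hk'
    · rw [if_neg h]
      obtain ⟨hle, hmem, hmax⟩ := ih m0
      refine ⟨hle, ?_, ?_⟩
      · rcases hmem with h1 | ⟨h1, h2, h3⟩
        · exact Or.inl h1
        · exact Or.inr ⟨by simp [h1], h2, h3⟩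
      · intro t' ht' h0' hk'
        rcases List.mem_cons.mp ht' with rfl | ht'
        · omega
        · exact hmax t' ht' h0' hk' 

theorem mem_cubeColsOf (n : Int) (s r : Bool) (cubes : List (Int × Int)) (c t : Int) :
    t ∈ (cubeColsOf n s r cubes).getD c [] ↔ ∃ q ∈ cubes, pvCol s q = c ∧ pvKey n s r q = t := by
  unfold cubeColsOf
  have hfold : ∀ (l : List (Int × Int)) (d : PySem.Dict Int (List Int)),
      l.foldl (fun d q => d.modify (pvCol s q) [] (· ++ [pvKey n s r q])) d
        = (l.map (fun q => (pvCol s q, pvKey n s r q))).foldl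
            (fun d p => d.modify p.1 [] (· ++ [p.2])) d := by
    intro l
    induction l with
    | nil => intro d; rfl
    | cons q l ih => intro d; simp only [List.foldl_cons, List.map_cons]; exact ih _
  rw [hfold, PySem.Dict.getD_foldl_modify_append]
  simp [List.mem_filter, List.mem_map]

-- the while-slide lands one above the greatest blocked cell below k
theorem slideG_char (n : Int) (s r : Bool) (L cubes : List (Int × Int)) (c k m : Int)
    (hk : 0 ≤ k) (hm : -1 ≤ m) (hmk : m < k)
    (hb : m = -1 ∨ (pvMk n s r c m ∈ L ∨ pvMk n s r c m ∈ cubes))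
    (hf : ∀ t, m < t → t < k → ¬(pvMk n s r c t ∈ L ∨ pvMk n s r c t ∈ cubes)) :
    slideG n s r L cubes c k = m + 1 := by
  have main : ∀ kN : Nat, ∀ k' : Int, k'.toNat = kN → 0 ≤ k' → m < k' → k' ≤ k →
      slideG n s r L cubes c k' = m + 1 := by
    intro kN
    induction kN using Nat.strong_induction_on with
    | _ kN ih =>
      intro k' hkN hk0 hmk' hk'le
      rw [slideG.eq_def]
      by_cases h0 : k' ≤ 0
      · have hz : k' = 0 := by omega
        have hm1 : m = -1 := by omega
        simp [h0]; omega
      · rw [dif_neg h0]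
        by_cases hcell : k' - 1 = m
        · have hbm : pvMk n s r c m ∈ L ∨ pvMk n s r c m ∈ cubes := by
            rcases hb with h1 | h1
            · omega
            · exact h1
          rw [if_pos (by rw [hcell]; exact hbm)]
          omega
        · have hgt : m < k' - 1 := by omega
          rw [if_neg (hf (k' - 1) hgt (by omega))]
          exact ih (k' - 1).toNat (by omega) (k' - 1) rfl (by omega) hgt (by omega)
  exact main k.toNat k rfl hk hmk le_rfl

theorem getD_set_self (L : List (Int × Int)) (j : Nat) (v d : Int × Int) (h : j < L.length) :
    (L.set j v).getD j d = v := by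
  simp [List.getD, h]

theorem getD_set_ne (L : List (Int × Int)) (j j' : Nat) (v d : Int × Int) (h : j' ≠ j) :
    (L.set j v).getD j' d = L.getD j' d := by
  simp [List.getD, List.getElem?_set_ne (fun he => h he.symm)]

theorem getD_mem (L : List (Int × Int)) (j : Nat) (d : Int × Int) (h : j < L.length) :
    L.getD j d ∈ L := by
  rw [List.getD, List.getElem?_eq_getElem h]
  exact List.getElem_mem h

theorem mem_getD (L : List (Int × Int)) (x : Int × Int) (d : Int × Int) (h : x ∈ L) :
    ∃ j, j < L.length ∧ L.getD j d = x := by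
  obtain ⟨j, hj, rfl⟩ := List.mem_iff_getElem.mp h
  exact ⟨j, hj, by simp [List.getD, List.getElem?_eq_getElem hj]⟩

theorem innerL (n : Int) (s r : Bool) (cubes rr : List (Int × Int)) (i : Int)
    (hi : 0 ≤ i) (_hin : i < n) :
    ∀ (js : List Nat) (L : List (Int × Int)) (S : PySem.Dict Int (List Int)),
      js.Nodup → (∀ j ∈ js, j < rr.length) →
      SimInv n s r rr L S (DoneP n s r rr i js) →
      js.foldl (sstep n s r cubes i) L
          = (((js.filter (fun j => decide (keyAt n s r rr j = i))).map
                (idxPair i)).foldl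
              (pstep n s r (cubeColsOf n s r cubes)) (S, L)).2
        ∧ SimInv n s r rr (js.foldl (sstep n s r cubes i) L)
            ((((js.filter (fun j => decide (keyAt n s r rr j = i))).map
                (idxPair i)).foldl
              (pstep n s r (cubeColsOf n s r cubes)) (S, L)).1)
            (DoneP n s r rr i []) := by
  intro js
  induction js with
  | nil =>
    intro L S _ _ hInv
    refine ⟨rfl, ?_⟩
    exact SimInv_congr n s r rr L S _ _ (fun j hj => Iff.rfl) hInv
  | cons j js ih =>
    intro L S hnd hlt hInv
    have hjlen : j < rr.length := hlt j (List.mem_cons_self ..)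
    have hjs_nd : js.Nodup := (List.nodup_cons.mp hnd).2
    have hj_not_js : j ∉ js := (List.nodup_cons.mp hnd).1
    obtain ⟨hlen, hcls, hfresh, hstl⟩ := hInv
    by_cases hK : keyAt n s r rr j = i
    · -- the head rock lives on the current line: both sides process it
      have hNotD : ¬ DoneP n s r rr i (j :: js) j := by
        unfold DoneP
        rintro (⟨_, h2⟩ | ⟨_, hmem⟩)
        · omega
        · exact hmem (List.mem_cons_self ..)
      have hLj : L.getD j (0, 0) = rr.getD j (0, 0) := hfresh j hjlen hNotD
      set p := rr.getD j (0, 0) with hp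
      set c := pvCol s p with hc
      set CC := cubeColsOf n s r cubes with hCC
      set m1 := (S.getD c []).foldl (fun m t => if m < t ∧ t < i then t else m) (-1) with hm1
      set m := (CC.getD c []).foldl (fun m t => if 0 ≤ t ∧ t < i ∧ m < t then t else m) m1 with hm
      obtain ⟨hle1, hmem1, hmax1⟩ := maxScan1 i (S.getD c []) (-1)
      obtain ⟨hle2, hmem2, hmax2⟩ := maxScan2 i (CC.getD c []) m1
      rw [← hm1] at hle1 hmem1 hmax1
      rw [← hm] at hle2 hmem2 hmax2
      have hmneg : -1 ≤ m := le_trans hle1 hle2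
      have hmlt : m < i := by
        rcases hmem2 with he | ⟨_, _, hlt2⟩
        · rw [he]
          rcases hmem1 with he1 | ⟨_, hlt1⟩
          · omega
          · exact hlt1
        · exact hlt2
      -- characterise the slide as m + 1
      have hblocked : m = -1 ∨ (pvMk n s r c m ∈ L ∨ pvMk n s r c m ∈ cubes) := by
        rcases hmem2 with he | ⟨hmemc, _, _⟩
        · rw [he]
          rcases hmem1 with he1 | ⟨hmemS, _⟩
          · exact Or.inl he1
          · obtain ⟨_, j', hj', _, heq⟩ := hstl c m1 hmemS
            refine Or.inr (Or.inl ?_)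
            rw [← heq]
            exact getD_mem L j' (0, 0) (by omega)
        · obtain ⟨q, hq, hqc, hqk⟩ := (mem_cubeColsOf n s r cubes c m).mp hmemc
          refine Or.inr (Or.inr ?_)
          have : q = pvMk n s r c m := (eq_mk_iff n s r q c m).mpr ⟨hqc, hqk⟩
          rwa [← this]
      have hfree : ∀ t, m < t → t < i → ¬(pvMk n s r c t ∈ L ∨ pvMk n s r c t ∈ cubes) := by
        intro t h1 h2 hbl
        have ht0 : 0 ≤ t := by omega
        rcases hbl with hbL | hbC
        · obtain ⟨j₂, hj₂, heq₂⟩ := mem_getD L (pvMk n s r c t) (0, 0) hbL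
          have hj₂r : j₂ < rr.length := by omega
          by_cases hD₂ : DoneP n s r rr i (j :: js) j₂
          · obtain ⟨hcol₂, _, _, hmem₂⟩ := hcls j₂ hj₂r hD₂
            simp only [colAt, keyAt] at hcol₂ hmem₂
            rw [heq₂, col_mk, key_mk] at hmem₂
            have := hmax1 t hmem₂ h2
            omega
          · have := hfresh j₂ hj₂r hD₂
            rw [this] at heq₂
            have hkey₂ : keyAt n s r rr j₂ = t := by unfold keyAt; rw [heq₂, key_mk]
            exact hD₂ (Or.inl ⟨by omega, by omega⟩)
        · have : t ∈ CC.getD c [] := by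
            rw [hCC]
            exact (mem_cubeColsOf n s r cubes c t).mpr
              ⟨pvMk n s r c t, hbC, col_mk .., key_mk ..⟩
          have := hmax2 t this ht0 h2
          omega
      have hslide : slideG n s r L cubes c i = m + 1 :=
        slideG_char n s r L cubes c i m hi hmneg hmlt hblocked hfree
      -- the two steps produce the same state
      have hsstep : sstep n s r cubes i L j = L.set j (pvMk n s r c (m + 1)) := by
        unfold sstep
        rw [hLj]
        have hK' : pvKey n s r p = i := hK
        simp only []
        rw [if_pos hK', hK', ← hc, hslide]
      have hpstep : pstep n s r CC (S, L) (idxPair i j)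
          = (S.modify c [] (· ++ [m + 1]), L.set j (pvMk n s r c (m + 1))) := by
        unfold pstep idxPair
        simp only [Int.toNat_natCast, hLj, ← hc, ← hm1, ← hm]
      have hfilter : (j :: js).filter (fun j => decide (keyAt n s r rr j = i))
          = j :: js.filter (fun j => decide (keyAt n s r rr j = i)) := by
        simp [hK]
      -- the invariant for the remaining indices
      have hInv' : SimInv n s r rr (L.set j (pvMk n s r c (m + 1)))
          (S.modify c [] (· ++ [m + 1])) (DoneP n s r rr i js) := by
        refine ⟨by simpa using hlen, ?_, ?_, ?_⟩
        · intro j' hj' hD'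
          by_cases hjj : j' = j
          · rw [hjj]
            simp only [colAt, keyAt]
            rw [getD_set_self _ _ _ _ (by omega), col_mk, key_mk]
            have hK' : pvKey n s r (rr.getD j (0, 0)) = i := hK
            refine ⟨by rw [hc, hp], by omega, by omega, ?_⟩
            rw [PySem.Dict.getD_modify, if_pos rfl]
            simp
          · have hD'' : DoneP n s r rr i (j :: js) j' := by
              unfold DoneP at hD' ⊢
              rcases hD' with h | ⟨h1, h2⟩
              · exact Or.inl h
              · exact Or.inr ⟨h1, by simp [hjj, h2]⟩
            obtain ⟨hcol', hk0', hkle', hmem'⟩ := hcls j' hj' hD''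
            simp only [colAt, keyAt] at hcol' hk0' hkle' hmem' ⊢
            rw [getD_set_ne _ _ _ _ _ hjj]
            refine ⟨hcol', hk0', hkle', ?_⟩
            rw [PySem.Dict.getD_modify]
            split_ifs with hceq
            · rw [hceq] at hmem'
              exact List.mem_append_left _ hmem'
            · exact hmem'
        · intro j' hj' hD'
          have hjj : j' ≠ j := by
            rintro rfl
            exact hD' (Or.inr ⟨hK, hj_not_js⟩)
          have hD'' : ¬ DoneP n s r rr i (j :: js) j' := by
            intro hd
            apply hD'
            unfold DoneP at hd ⊢
            rcases hd with h | ⟨h1, h2⟩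
            · exact Or.inl h
            · exact Or.inr ⟨h1, fun hmem => h2 (List.mem_cons_of_mem _ hmem)⟩
          rw [getD_set_ne _ _ _ _ _ hjj]
          exact hfresh j' hj' hD''
        · intro c'' t ht
          rw [PySem.Dict.getD_modify] at ht
          by_cases hceq : c'' = c
          · rw [if_pos hceq] at ht
            rcases List.mem_append.mp ht with htold | htnew
            · obtain ⟨ht0, j₃, hj₃, hD₃, heq₃⟩ := hstl c'' t (by rw [hceq]; exact htold)
              have hjj₃ : j₃ ≠ j := by
                rintro rfl
                exact hNotD hD₃
              refine ⟨ht0, j₃, hj₃, ?_, ?_⟩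
              · unfold DoneP at hD₃ ⊢
                rcases hD₃ with h | ⟨h1, h2⟩
                · exact Or.inl h
                · exact Or.inr ⟨h1, fun hmem => h2 (List.mem_cons_of_mem _ hmem)⟩
              · rw [getD_set_ne _ _ _ _ _ hjj₃, heq₃]
            · have htm : t = m + 1 := by simpa using htnew
              refine ⟨by omega, j, hjlen, Or.inr ⟨hK, hj_not_js⟩, ?_⟩
              rw [getD_set_self _ _ _ _ (by omega), htm, hceq]
          · rw [if_neg hceq] at ht
            obtain ⟨ht0, j₃, hj₃, hD₃, heq₃⟩ := hstl c'' t ht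
            have hjj₃ : j₃ ≠ j := by
              rintro rfl
              exact hNotD hD₃
            refine ⟨ht0, j₃, hj₃, ?_, ?_⟩
            · unfold DoneP at hD₃ ⊢
              rcases hD₃ with h | ⟨h1, h2⟩
              · exact Or.inl h
              · exact Or.inr ⟨h1, fun hmem => h2 (List.mem_cons_of_mem _ hmem)⟩
            · rw [getD_set_ne _ _ _ _ _ hjj₃, heq₃]
      obtain ⟨ihq, ihInv⟩ := ih (L.set j (pvMk n s r c (m + 1)))
        (S.modify c [] (· ++ [m + 1])) hjs_nd
        (fun j' hj' => hlt j' (List.mem_cons_of_mem _ hj')) hInv'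
      constructor
      · rw [List.foldl_cons, hsstep, hfilter, List.map_cons, List.foldl_cons, hpstep, ihq]
      · rw [List.foldl_cons, hsstep, hfilter, List.map_cons, List.foldl_cons, hpstep]
        exact ihInv
    · -- the head rock is not on line i: no-op on both sides
      have hnoop : sstep n s r cubes i L j = L := by
        unfold sstep
        by_cases hD : DoneP n s r rr i (j :: js) j
        · obtain ⟨_, _, hkle, _⟩ := hcls j hjlen hD
          have hklt : keyAt n s r rr j < i := by
            unfold DoneP at hD
            rcases hD with ⟨_, h⟩ | ⟨h, _⟩
            · exact h
            · exact absurd h hK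
          unfold keyAt at hkle hklt
          rw [if_neg (by omega)]
        · have hLj := hfresh j hjlen hD
          rw [hLj, if_neg ?_]
          exact fun he => hK he
      have hfilter : (j :: js).filter (fun j => decide (keyAt n s r rr j = i))
          = js.filter (fun j => decide (keyAt n s r rr j = i)) := by
        simp [hK]
      have hInv' : SimInv n s r rr L S (DoneP n s r rr i js) := by
        refine SimInv_congr n s r rr L S _ _ (fun j' hj' => ?_) ⟨hlen, hcls, hfresh, hstl⟩
        unfold DoneP
        by_cases hjj : j' = j
        · subst hjj
          constructor
          · rintro (h | ⟨h1, _⟩)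
            · exact Or.inl h
            · exact absurd h1 hK
          · rintro (h | ⟨h1, _⟩)
            · exact Or.inl h
            · exact absurd h1 hK
        · constructor
          · rintro (h | ⟨h1, h2⟩)
            · exact Or.inl h
            · exact Or.inr ⟨h1, fun hm => h2 (List.mem_cons_of_mem _ hm)⟩
          · rintro (h | ⟨h1, h2⟩)
            · exact Or.inl h
            · exact Or.inr ⟨h1, by simp [hjj, h2]⟩
      obtain ⟨ihq, ihInv⟩ := ih L S hjs_nd (fun j' hj' => hlt j' (List.mem_cons_of_mem _ hj')) hInv'
      constructor
      · rw [List.foldl_cons, hnoop, hfilter, ihq]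
      · rw [List.foldl_cons, hnoop, hfilter]
        exact ihInv

theorem outerL (n : Int) (s r : Bool) (cubes rr : List (Int × Int)) :
    ∀ (a : Int) (L : List (Int × Int)) (S : PySem.Dict Int (List Int)), 0 ≤ a →
      SimInv n s r rr L S (fun j => 0 ≤ keyAt n s r rr j ∧ keyAt n s r rr j < a) →
      (PySem.List.pyRange a n 1).foldl
          (fun L i => (List.range L.length).foldl (sstep n s r cubes i) L) L
        = (((PySem.List.pyRange a n 1).flatMap
              (fun i => (rowJs n s r rr i).map (idxPair i))).foldl
            (pstep n s r (cubeColsOf n s r cubes)) (S, L)).2 := by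
  have main : ∀ (d : Nat) (a : Int) (L : List (Int × Int)) (S : PySem.Dict Int (List Int)),
      (n - a).toNat = d → 0 ≤ a →
      SimInv n s r rr L S (fun j => 0 ≤ keyAt n s r rr j ∧ keyAt n s r rr j < a) →
      (PySem.List.pyRange a n 1).foldl
          (fun L i => (List.range L.length).foldl (sstep n s r cubes i) L) L
        = (((PySem.List.pyRange a n 1).flatMap
              (fun i => (rowJs n s r rr i).map (idxPair i))).foldl
            (pstep n s r (cubeColsOf n s r cubes)) (S, L)).2 := by
    intro d
    induction d using Nat.strong_induction_on with
    | _ d ih =>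
      intro a L S hd ha hInv
      by_cases hna : n ≤ a
      · rw [PySem.List.pyRange_one_eq_nil hna]; simp
      · rw [not_le] at hna
        rw [PySem.List.pyRange_one_cons hna]
        simp only [List.foldl_cons, List.flatMap_cons]
        rw [List.foldl_append]
        have hlen : L.length = rr.length := hInv.1
        have hInv' : SimInv n s r rr L S (DoneP n s r rr a (List.range rr.length)) := by
          refine SimInv_congr n s r rr L S _ _ (fun j hj => ?_) hInv
          unfold DoneP
          constructor
          · intro h; exact Or.inl h
          · rintro (h | ⟨hk, hmem⟩)
            · exact h
            · exact absurd (List.mem_range.mpr hj) hmem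
        have hinner := innerL n s r cubes rr a ha (by omega) (List.range rr.length) L S
          List.nodup_range (fun j hj => List.mem_range.mp hj) hInv'
        rw [hlen]
        have hrow : (rowJs n s r rr a).map (idxPair a)
            = ((List.range rr.length).filter
                (fun j => decide (keyAt n s r rr j = a))).map (idxPair a) := rfl
        rw [hrow, hinner.1]
        have hInvNext : SimInv n s r rr
            ((((List.range rr.length).filter
                (fun j => decide (keyAt n s r rr j = a))).map (idxPair a)).foldl
              (pstep n s r (cubeColsOf n s r cubes)) (S, L)).2
            ((((List.range rr.length).filter
                (fun j => decide (keyAt n s r rr j = a))).map (idxPair a)).foldl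
              (pstep n s r (cubeColsOf n s r cubes)) (S, L)).1
            (fun j => 0 ≤ keyAt n s r rr j ∧ keyAt n s r rr j < a + 1) := by
          refine SimInv_congr n s r rr _ _ (DoneP n s r rr a []) _ (fun j hj => ?_) ?_
          · unfold DoneP
            constructor
            · rintro (⟨h1, h2⟩ | ⟨h1, _⟩) <;> omega
            · rintro ⟨h1, h2⟩
              by_cases hlt : keyAt n s r rr j < a
              · exact Or.inl ⟨h1, hlt⟩
              · exact Or.inr ⟨by omega, by simp⟩
          · have h2 := hinner.2
            rw [hinner.1] at h2
            exact h2
        have hrec := ih (n - (a + 1)).toNat (by omega) (a + 1) _ _ rfl (by omega) hInvNext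
        simpa using hrec
  intro a L S ha hInv
  exact main (n - a).toNat a L S rfl ha hInv

theorem simG_eq_packTilt (n : Int) (s r : Bool) (cubes rr : List (Int × Int)) :
    simG n s r cubes rr = packTilt n s r cubes rr := by
  rw [simG_def, packTilt_def, sorted_groups n s r rr]
  refine outerL n s r cubes rr 0 rr PySem.Dict.empty le_rfl ?_
  refine ⟨rfl, fun j hj hD => absurd hD (by omega), fun j hj _ => rfl, fun c t ht => ?_⟩
  simp [PySem.Dict.getD_empty] at ht

-- ===== VERDICT (by name: the statement is the Claim_ definition above) =====
theorem tilt_platform_spec : Claim_equal_tilt_platform := by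
  intro map rr cubes dir _hdom _hpre
  unfold Spec_tilt_platform tilt_platform tilt_platform_alt
  by_cases h1 : dir = "north"
  · simp [h1, tiltNorth_eq, simG_eq_packTilt]
  by_cases h2 : dir = "west"
  · simp [h2, tiltWest_eq, simG_eq_packTilt]
  by_cases h3 : dir = "south"
  · simp [h3, tiltSouth_eq, simG_eq_packTilt]
  by_cases h4 : dir = "east"
  · simp [h4, tiltEast_eq, simG_eq_packTilt]
  simp [h1, h2, h3, h4]
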